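-- pv_equiv track=rewrite | github.com/Smonkey123/FAST | need - Copy/BOM_Check.py | merge_table_content
-- ===== SOURCE A (Python) =====
-- def merge_table_content(data):
--     # # 获得所有唯一的柜型和标签
--     # cabinet_types = sorted(set(row[0] for row in data[1:]))
--     # labels = sorted(set(row[1] for row in data[1:]))
--     #
--     # # 创建初始透视表，行为唯一柜型加上一个空行，列为唯一标签加上一个空标签
--     # pivot_table = [[''] + labels]
--     #
--     # # 为每个柜型创建一行，并用空字符串进行初始化
--     # for cabinet in cabinet_types:
--     #     pivot_table.append([cabinet] + ['' for _ in labels])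
--     #
--     # # 创建一个简单的映射，以便可以通过标签找到对应的列索引
--     # label_to_index = {label: index + 1 for index, label in enumerate(labels)}  # 列索引 +1 是为了跳过行头
--     #
--     # # 填充透视表数据
--     # for row in data[1:]:
--     #     cabinet, label, voltage, manufacturer, aux_contact = row
--     #     # 找到对应柜型和标签的索引
--     #     row_index = cabinet_types.index(cabinet) + 1  # 行索引 +1 是为了跳过标题行
--     #     col_index = label_to_index[label]
--     #     # 将电压等级，厂家，辅助触点组合为一个字符串，并分配给对应单元格
--     #     pivot_table[row_index][col_index] = f"{voltage}\n{manufacturer}\n{aux_contact}"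
--     #
--     # return pivot_table
--
--     # 最大列数为10，-1 是为了让第一列空出来放柜型
--     MAX_COLUMNS = 11
--
--     # 提取各个柜型和标签，创建唯一的集合
--     cabinet_types = sorted(set(row[0] for row in data[1:]))
--     unique_labels = sorted(set(row[1] for row in data[1:]))
--
--     # 准备数据结构
--     pivot_data = {cabinet: {label: '' for label in unique_labels} for cabinet in cabinet_types}
--
--     # 填充数据到透视表结构
--     for row in data[1:]:
--         cabinet = row[0]
--         label = row[1]
--         values = '\n'.join(row[2:])
--         pivot_data[cabinet][label] = values
--
--     # 拆分表头来适应最大列数，生成多个透视表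
--     tables = []
--     labels_covered = 0
--     while labels_covered < len(unique_labels):
--         # 当前表覆盖的标签范围
--         labels_for_this_table = unique_labels[labels_covered: labels_covered + MAX_COLUMNS - 1]
--         labels_covered += MAX_COLUMNS - 1
--
--         # 制作表头，包含柜型和当前表的标签
--         header = [''] + labels_for_this_table
--         tables.append([header])
--
--         # 根据当前覆盖的标签填充每个柜型对应的数据行
--         for cabinet in cabinet_types:
--             row = [cabinet] + [pivot_data[cabinet].get(label, '') for label in labels_for_this_table]
--             tables[-1].append(row)
--     return tables
-- ===== SOURCE B (Python) =====
-- def merge_table_content(data):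
--     rows = data[1:]
--     cabinet_types = sorted(set(r[0] for r in rows))
--     unique_labels = sorted(set(r[1] for r in rows))
--
--     # one flat dict keyed by (cabinet, label); last write wins, like A's nested dict
--     cells = {}
--     for r in rows:
--         cells[(r[0], r[1])] = '\n'.join(r[2:])
--
--     # build the single full pivot matrix first ...
--     full = [[''] + unique_labels]
--     for c in cabinet_types:
--         full.append([c] + [cells.get((c, l), '') for l in unique_labels])
--
--     # ... then produce the output tables by column-slicing it in chunks of 10
--     return [[[row[0]] + row[1 + s:11 + s] for row in full]
--             for s in range(0, len(unique_labels), 10)]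
-- ===== Notes on version B (the rewrite author's own statement) =====
-- stated objective: simpler
-- what changed: B replaces A's nested per-cabinet dict and per-chunk table construction by one flat dict keyed by (cabinet,label) pairs, builds the single full pivot matrix once, and produces the output tables by column-slicing that matrix in steps of 10.
import Mathlib
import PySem

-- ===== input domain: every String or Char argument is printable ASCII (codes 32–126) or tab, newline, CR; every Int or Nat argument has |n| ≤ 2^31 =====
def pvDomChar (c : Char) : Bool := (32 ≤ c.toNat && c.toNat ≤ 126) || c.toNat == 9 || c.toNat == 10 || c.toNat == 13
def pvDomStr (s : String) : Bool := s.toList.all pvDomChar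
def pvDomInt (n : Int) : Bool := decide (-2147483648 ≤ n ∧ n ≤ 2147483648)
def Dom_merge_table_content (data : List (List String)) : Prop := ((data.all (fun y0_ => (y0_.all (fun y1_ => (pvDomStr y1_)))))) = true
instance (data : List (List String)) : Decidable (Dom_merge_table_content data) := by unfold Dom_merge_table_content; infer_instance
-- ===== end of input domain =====

-- B builds one flat (cabinet,label)-keyed dict and the single full pivot matrix, then
-- column-slices it into tables, instead of A's nested dict and per-chunk row construction.

-- ===== PORT A =====
-- {label: '' for label in unique_labels}
def mtcInitInner (labels : List String) : PySem.Dict String String :=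
  labels.foldl (fun e l => e.insert l "") PySem.Dict.empty

-- the fill loop: pivot_data[row[0]][row[1]] = '\n'.join(row[2:]).
-- pivot_data[row[0]] would be a KeyError if the key were absent; it never is (row[0] ∈ cabinet_types),
-- so the `none` branch (leaving the dict unchanged) is unreachable.
def mtcFillA (rows : List (List String))
    (init : PySem.Dict String (PySem.Dict String String)) : PySem.Dict String (PySem.Dict String String) :=
  rows.foldl (fun d r =>
    match d.get? (PySem.List.pyGetD r 0 "") with
    | some inner =>
        d.insert (PySem.List.pyGetD r 0 "")
          (inner.insert (PySem.List.pyGetD r 1 "") (PySem.Str.join "\n" (PySem.List.slice r (some 2) none)))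
    | none => d) init

-- pivot_data[cabinet].get(label, ''); pivot_data[cabinet] never raises (cabinet ∈ cabinet_types = keys)
def mtcCellA (pivot : PySem.Dict String (PySem.Dict String String)) (c l : String) : String :=
  match pivot.get? c with
  | some inner => inner.getD l ""
  | none => ""

-- the `while labels_covered < len(unique_labels)` loop (MAX_COLUMNS - 1 = 10)
def mtcTablesA (C L : List String) (pivot : PySem.Dict String (PySem.Dict String String))
    (covered : Nat) : List (List (List String)) :=
  if _h : covered < L.length then
    let lft := PySem.List.slice L (some (covered : Int)) (some ((covered : Int) + 10))
    (("" :: lft) :: C.map (fun c => c :: lft.map (fun l => mtcCellA pivot c l)))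
      :: mtcTablesA C L pivot (covered + 10)
  else []
termination_by L.length - covered

def merge_table_content (data : List (List String)) : List (List (List String)) :=
  let rows := PySem.List.slice data (some 1) none
  let C := PySem.List.sorted (PySem.Set.ofList (rows.map (fun r => PySem.List.pyGetD r 0 ""))) (fun x => x) false
  let L := PySem.List.sorted (PySem.Set.ofList (rows.map (fun r => PySem.List.pyGetD r 1 ""))) (fun x => x) false
  let pivot := mtcFillA rows (C.foldl (fun d c => d.insert c (mtcInitInner L)) PySem.Dict.empty)
  mtcTablesA C L pivot 0

-- ===== PORT B =====
-- cells[(r[0], r[1])] = '\n'.join(r[2:])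
def mtcCells (rows : List (List String)) : PySem.Dict (String × String) String :=
  rows.foldl (fun d r =>
    d.insert (PySem.List.pyGetD r 0 "", PySem.List.pyGetD r 1 "")
      (PySem.Str.join "\n" (PySem.List.slice r (some 2) none))) PySem.Dict.empty

def merge_table_content_alt (data : List (List String)) : List (List (List String)) :=
  let rows := PySem.List.slice data (some 1) none
  let C := PySem.List.sorted (PySem.Set.ofList (rows.map (fun r => PySem.List.pyGetD r 0 ""))) (fun x => x) false
  let L := PySem.List.sorted (PySem.Set.ofList (rows.map (fun r => PySem.List.pyGetD r 1 ""))) (fun x => x) false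
  let cells := mtcCells rows
  let full := ("" :: L) :: C.map (fun c => c :: L.map (fun l => cells.getD (c, l) ""))
  (PySem.List.pyRange 0 (L.length : Int) 10).map (fun s =>
    full.map (fun row => PySem.List.pyGetD row 0 "" :: PySem.List.slice row (some (1 + s)) (some (11 + s))))

-- ===== PRECONDITION & SPEC =====
-- Pre_ excludes exactly the inputs where A raises IndexError: a row of data[1:] with fewer
-- than two fields (row[0] / row[1]).
def Pre_merge_table_content (data : List (List String)) : Prop :=
  ∀ r ∈ data.drop 1, 2 ≤ r.length
instance (data : List (List String)) : Decidable (Pre_merge_table_content data) := by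
  unfold Pre_merge_table_content; infer_instance

def pvWitness_merge_table_content : List (List String) :=
  [["cab", "lab", "volt", "man", "aux"], ["c1", "l1", "v", "m", "x"], ["c2", "l1", "v2", "m2", ""]]

def Spec_merge_table_content (data : List (List String)) (out : List (List (List String))) : Prop := out = merge_table_content_alt data
instance (data : List (List String)) (out : List (List (List String))) : Decidable (Spec_merge_table_content data out) := by unfold Spec_merge_table_content; infer_instance

-- ===== CLAIM (what is proved, stated in full; the proofs are below) =====
def Claim_equal_merge_table_content : Prop := ∀ (data : List (List String)), Dom_merge_table_content data → Pre_merge_table_content data → Spec_merge_table_content data (merge_table_content data)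

-- ===== LEMMAS AND PROOFS =====

-- range(a, b, 10) unrolls one element while a < b
theorem mtc_pyRange10_cons (a b : Int) (h : a < b) :
    PySem.List.pyRange a b 10 = a :: PySem.List.pyRange (a + 10) b 10 := by
  rw [PySem.List.pyRange_of_pos a b (by norm_num), PySem.List.pyRange_of_pos (a + 10) b (by norm_num)]
  by_cases h2 : a + 10 < b
  · have hn : ((b - a + 10 - 1) / 10).toNat = ((b - (a + 10) + 10 - 1) / 10).toNat + 1 := by omega
    rw [if_pos h, if_pos h2, hn, List.range_succ_eq_map]
    simp only [List.map_cons, List.map_map]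
    congr 1
    · push_cast; ring
    · apply List.map_congr_left
      intro k _
      simp only [Function.comp_apply]
      push_cast
      ring
  · have hn : ((b - a + 10 - 1) / 10).toNat = 1 := by omega
    rw [if_pos h, if_neg h2, hn]
    simp

theorem mtc_pyRange10_nil (a b : Int) (h : b ≤ a) :
    PySem.List.pyRange a b 10 = [] := by
  rw [PySem.List.pyRange_of_pos a b (by norm_num)]
  rw [if_neg (by omega)]
  simp

-- the inner dict of the comprehension maps every label (present or not) to ''
theorem mtc_initInner_getD (labels : List String) (l : String) :
    (mtcInitInner labels).getD l "" = "" := by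
  unfold mtcInitInner
  suffices h : ∀ (d : PySem.Dict String String), d.getD l "" = "" →
      (labels.foldl (fun e x => e.insert x "") d).getD l "" = "" by
    exact h _ (by simp [PySem.Dict.getD_empty])
  induction labels with
  | nil => intro d hd; simpa using hd
  | cons x xs ih =>
      intro d hd
      simp only [List.foldl_cons]
      exact ih _ (by rw [PySem.Dict.getD_insert]; split <;> simp [hd])

-- after the initialisation fold, every cabinet of C is a key mapped to the blank inner dict
theorem mtc_init_get? (C : List String) (L : List String)
    (d : PySem.Dict String (PySem.Dict String String)) (c : String)
    (h : c ∈ C ∨ d.get? c = some (mtcInitInner L)) :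
    (C.foldl (fun d c => d.insert c (mtcInitInner L)) d).get? c = some (mtcInitInner L) := by
  induction C generalizing d with
  | nil => simpa using h.elim (fun hc => absurd hc (List.not_mem_nil)) id
  | cons c0 cs ih =>
      simp only [List.foldl_cons]
      by_cases hc : c = c0
      · subst hc
        exact ih _ (Or.inr (PySem.Dict.get?_insert_self _ _ _))
      · refine ih _ ?_
        rcases h with hmem | hget
        · rcases List.mem_cons.mp hmem with h0 | h0
          · exact absurd h0 hc
          · exact Or.inl h0
        · exact Or.inr (by rw [PySem.Dict.get?_insert_of_ne _ _ hc]; exact hget)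

-- INVARIANT of the two fill loops: for every cabinet of C, A's nested lookup agrees with
-- B's flat (cabinet,label) dict on every label.
theorem mtc_fill_invariant (C : List String) (rows : List (List String))
    (outer : PySem.Dict String (PySem.Dict String String))
    (flat : PySem.Dict (String × String) String)
    (hout : ∀ c ∈ C, ∃ inner, outer.get? c = some inner ∧ ∀ l, inner.getD l "" = flat.getD (c, l) "")
    (hrows : ∀ r ∈ rows, PySem.List.pyGetD r 0 "" ∈ C) :
    ∀ c ∈ C, ∃ inner, (mtcFillA rows outer).get? c = some inner ∧
      ∀ l, inner.getD l "" =
        (rows.foldl (fun d r =>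
          d.insert (PySem.List.pyGetD r 0 "", PySem.List.pyGetD r 1 "")
            (PySem.Str.join "\n" (PySem.List.slice r (some 2) none))) flat).getD (c, l) "" := by
  induction rows generalizing outer flat with
  | nil => intro c hc; simpa [mtcFillA] using hout c hc
  | cons r rs ih =>
      have hr0 : PySem.List.pyGetD r 0 "" ∈ C := hrows r List.mem_cons_self
      obtain ⟨inner0, hget0, hagree0⟩ := hout _ hr0
      simp only [mtcFillA, List.foldl_cons] at *
      rw [hget0]
      refine ih _ _ ?_ (fun r' hr' => hrows r' (List.mem_cons_of_mem _ hr'))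
      intro c hc
      by_cases hcc : c = PySem.List.pyGetD r 0 ""
      · subst hcc
        refine ⟨_, PySem.Dict.get?_insert_self _ _ _, fun l => ?_⟩
        rw [PySem.Dict.getD_insert, PySem.Dict.getD_insert]
        by_cases hl : l = PySem.List.pyGetD r 1 ""
        · simp [hl]
        · rw [if_neg hl, if_neg (by simp [hl]), hagree0]
      · obtain ⟨inner, hget, hagree⟩ := hout c hc
        refine ⟨inner, ?_, fun l => ?_⟩
        · rw [PySem.Dict.get?_insert_of_ne _ _ hcc]; exact hget
        · rw [PySem.Dict.getD_insert, if_neg (by simp [hcc]), hagree]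

-- A's while loop over chunk starts IS B's map over range(covered, len(L), 10)
theorem mtc_tables_eq (C L : List String)
    (pivot : PySem.Dict String (PySem.Dict String String))
    (cells : PySem.Dict (String × String) String)
    (hcell : ∀ c ∈ C, ∀ l, mtcCellA pivot c l = cells.getD (c, l) "") :
    ∀ (n covered : Nat), L.length - covered ≤ n →
      mtcTablesA C L pivot covered =
        (PySem.List.pyRange (covered : Int) (L.length : Int) 10).map (fun s =>
          ((("" :: L) :: C.map (fun c => c :: L.map (fun l => cells.getD (c, l) ""))).map
            (fun row => PySem.List.pyGetD row 0 "" :: PySem.List.slice row (some (1 + s)) (some (11 + s))))) := by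
  intro n
  induction n with
  | zero =>
      intro covered hcov
      rw [mtcTablesA, dif_neg (by omega), mtc_pyRange10_nil _ _ (by exact_mod_cast Nat.le_of_sub_eq_zero (Nat.le_zero.mp hcov))]
      simp
  | succ m ih =>
      intro covered hcov
      by_cases h : covered < L.length
      · rw [mtcTablesA, dif_pos h,
          mtc_pyRange10_cons _ _ (by exact_mod_cast h)]
        simp only [List.map_cons]
        congr 1
        · -- the table for this chunk
          have hslice : ∀ (row : List String),
              PySem.List.slice row (some (1 + (covered : Int))) (some (11 + (covered : Int)))
                = (row.drop (1 + covered)).take 10 := by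
            intro row
            rw [show (1 : Int) + (covered : Int) = ((1 + covered : Nat) : Int) by push_cast; ring,
              show (11 : Int) + ((covered : Nat) : Int) = (((1 + covered : Nat)) : Int) + ((10 : Nat) : Int) by push_cast; ring,
              PySem.List.slice_natCast_add]
          have hlft : PySem.List.slice L (some (covered : Int)) (some ((covered : Int) + 10))
              = (L.drop covered).take 10 := by
            rw [show ((covered : Int) + 10) = ((covered : Int) + ((10 : Nat) : Int)) by norm_num,
              PySem.List.slice_natCast_add]
          congr 1
          · -- header row
            rw [hslice, hlft, Nat.add_comm 1 covered, List.drop_succ_cons]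
            simp [PySem.List.pyGetD_ofNat']
          · -- cabinet rows
            rw [List.map_map]
            apply List.map_congr_left
            intro c hc
            simp only [Function.comp_apply]
            rw [hslice, hlft, Nat.add_comm 1 covered, List.drop_succ_cons,
              ← List.map_drop, ← List.map_take]
            congr 1
            · simp [PySem.List.pyGetD_ofNat']
            · exact List.map_congr_left (fun l _ => hcell c hc l)
        · have : ((covered : Int) + 10) = (((covered + 10 : Nat)) : Int) := by push_cast; ring
          rw [this]
          exact ih (covered + 10) (by omega)
      · rw [mtcTablesA, dif_neg h, mtc_pyRange10_nil _ _ (by exact_mod_cast Nat.le_of_not_lt h)]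
        simp

-- ===== VERDICT (by name: the statement is the Claim_ definition above) =====
theorem merge_table_content_spec : Claim_equal_merge_table_content := by
  intro data _hdom _hpre
  unfold Spec_merge_table_content merge_table_content merge_table_content_alt
  set rows := PySem.List.slice data (some 1) none with hrows
  set C := PySem.List.sorted (PySem.Set.ofList (rows.map (fun r => PySem.List.pyGetD r 0 ""))) (fun x => x) false with hC
  set L := PySem.List.sorted (PySem.Set.ofList (rows.map (fun r => PySem.List.pyGetD r 1 ""))) (fun x => x) false with hL
  have hmem : ∀ r ∈ rows, PySem.List.pyGetD r 0 "" ∈ C := by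
    intro r hr
    rw [hC, PySem.List.mem_sorted, PySem.Set.mem_ofList]
    exact List.mem_map.mpr ⟨r, hr, rfl⟩
  have hinit : ∀ c ∈ C, ∃ inner,
      (C.foldl (fun d c => d.insert c (mtcInitInner L)) PySem.Dict.empty).get? c = some inner ∧
      ∀ l, inner.getD l "" = (PySem.Dict.empty : PySem.Dict (String × String) String).getD (c, l) "" := by
    intro c hc
    exact ⟨mtcInitInner L, mtc_init_get? C L _ c (Or.inl hc),
      fun l => by rw [mtc_initInner_getD, PySem.Dict.getD_empty]⟩
  have hfill := mtc_fill_invariant C rows _ _ hinit hmem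
  have hcell : ∀ c ∈ C, ∀ l,
      mtcCellA (mtcFillA rows (C.foldl (fun d c => d.insert c (mtcInitInner L)) PySem.Dict.empty)) c l
        = (mtcCells rows).getD (c, l) "" := by
    intro c hc l
    obtain ⟨inner, hget, hagree⟩ := hfill c hc
    rw [mtcCellA, hget]
    simpa [mtcCells] using hagree l
  have h := mtc_tables_eq C L _ _ hcell L.length 0 (by omega)
  rw [Nat.cast_zero] at h
  exact h
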